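-- pv_equiv track=rewrite | github.com/TheRealAniG/CS5 | hw6pr5.py | summedUpto
-- ===== SOURCE A (Python) =====
-- def summedUpto(exc, L):
--     """Takes an integer exc and a list of integers L and returns sum of all integers up to exc
--     """
--     result = 0
--     for x in L:
--         if(x == exc):
--             break
--         else:
--             result = result + x
--     return result
-- ===== SOURCE B (Python) =====
-- def summedUpto(exc, L):
--     try:
--         return sum(L[:L.index(exc)])
--     except ValueError:
--         return sum(L)
-- ===== Notes on version B (the rewrite author's own statement) =====
-- stated objective: idiomatic
-- what changed: Replaces the fused accumulate-with-break loop by find-the-boundary-then-sum-the-prefix: L.index(exc) plus sum of the slice, with the whole-list sum in the ValueError branch.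
import Mathlib
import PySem

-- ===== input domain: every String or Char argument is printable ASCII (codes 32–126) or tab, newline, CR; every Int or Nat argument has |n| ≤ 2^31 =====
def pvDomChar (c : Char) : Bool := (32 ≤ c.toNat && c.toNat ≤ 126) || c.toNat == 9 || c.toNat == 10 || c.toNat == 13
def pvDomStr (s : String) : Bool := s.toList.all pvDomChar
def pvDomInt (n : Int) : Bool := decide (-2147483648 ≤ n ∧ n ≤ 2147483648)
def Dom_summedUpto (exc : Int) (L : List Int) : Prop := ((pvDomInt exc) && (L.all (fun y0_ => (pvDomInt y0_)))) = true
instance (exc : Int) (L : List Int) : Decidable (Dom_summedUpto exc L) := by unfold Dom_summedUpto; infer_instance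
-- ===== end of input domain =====

-- B: find the break index first (L.index(exc)), then sum the prefix slice; idiomatic decomposition, same return values.
-- ===== PORT A =====
def summedUptoLoop (exc : Int) (result : Int) : List Int → Int
  | [] => result
  | x :: xs => if x == exc then result else summedUptoLoop exc (result + x) xs

def summedUpto (exc : Int) (L : List Int) : Int :=
  summedUptoLoop exc 0 L

-- ===== PORT B =====
def summedUpto_alt (exc : Int) (L : List Int) : Int :=
  match PySem.List.index? L exc with
  | some i => (PySem.List.slice L none (some (i : Int))).sum
  | none => L.sum

-- ===== PRECONDITION & SPEC =====
def Spec_summedUpto (exc : Int) (L : List Int) (out : Int) : Prop := out = summedUpto_alt exc L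
instance (exc : Int) (L : List Int) (out : Int) : Decidable (Spec_summedUpto exc L out) := by unfold Spec_summedUpto; infer_instance

-- ===== CLAIM (what is proved, stated in full; the proofs are below) =====
def Claim_equal_summedUpto : Prop := ∀ (exc : Int) (L : List Int), Dom_summedUpto exc L → Spec_summedUpto exc L (summedUpto exc L)

-- ===== LEMMAS AND PROOFS =====

-- ===== VERDICT (by name: the statement is the Claim_ definition above) =====
lemma alt_cons (exc x : Int) (xs : List Int) :
    summedUpto_alt exc (x :: xs) = if x = exc then 0 else x + summedUpto_alt exc xs := by
  by_cases hx : x = exc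
  · subst hx
    rw [summedUpto_alt, PySem.List.index?_cons_self]
    simp [PySem.List.slice]
  · rw [summedUpto_alt, PySem.List.index?_cons_of_ne xs hx]
    cases h : PySem.List.index? xs exc with
    | none =>
      simp only [Option.map_none]
      rw [summedUpto_alt, h]
      simp [hx]
    | some i =>
      simp only [Option.map_some]
      rw [summedUpto_alt, h]
      simp only [hx, if_false]
      rw [PySem.List.slice_to_natCast, PySem.List.slice_to_natCast]
      simp [List.take_succ_cons]

lemma summedUptoLoop_eq (exc acc : Int) (L : List Int) :
    summedUptoLoop exc acc L = acc + summedUpto_alt exc L := by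
  induction L generalizing acc with
  | nil => simp [summedUptoLoop, summedUpto_alt, PySem.List.index?]
  | cons x xs ih =>
    rw [summedUptoLoop, alt_cons]
    by_cases hx : x = exc
    · simp [hx]
    · simp only [beq_iff_eq, hx, if_false, ih]
      ring

theorem summedUpto_spec : Claim_equal_summedUpto := by
  intro exc L _
  unfold Spec_summedUpto summedUpto
  rw [summedUptoLoop_eq]
  ring
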